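-- pv_equiv track=rewrite | github.com/mostafa-yasen/ms-min-cost | app.py | solution
-- ===== SOURCE A (Python) =====
-- from typing import List
--
-- def solution(S: str, C: List[int]):
--     S = [c for c in S]
--     b = [""]
--     total = 0
--     dublicates = [[0]]
--
--     for i, c in enumerate(S):
--         if c == b[-1]:
--             dublicates[-1].append(C[i])
--         else:
--             dublicates.append([C[i]])
--
--         b.append(c)
--
--     for l in dublicates:
--         while len(l) > 1:
--             cost = min(l)
--             total += cost
--             l.remove(cost)
--
--     return total
-- ===== SOURCE B (Python) =====
-- def solution(S, C):
--     total = 0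
--     prev = None
--     run_sum = 0
--     run_max = 0
--     for ch, cost in zip(S, C):
--         if ch == prev:
--             run_sum += cost
--             run_max = max(run_max, cost)
--         else:
--             total += run_sum - run_max
--             run_sum = cost
--             run_max = cost
--             prev = ch
--     return total + run_sum - run_max
-- ===== Notes on version B (the rewrite author's own statement) =====
-- stated objective: faster
-- what changed: B replaces A's list-of-lists bookkeeping and per-run repeated min()+remove() scans by a single pass that keeps a running sum and running max per run and adds sum-max at each run boundary.
import Mathlib
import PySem

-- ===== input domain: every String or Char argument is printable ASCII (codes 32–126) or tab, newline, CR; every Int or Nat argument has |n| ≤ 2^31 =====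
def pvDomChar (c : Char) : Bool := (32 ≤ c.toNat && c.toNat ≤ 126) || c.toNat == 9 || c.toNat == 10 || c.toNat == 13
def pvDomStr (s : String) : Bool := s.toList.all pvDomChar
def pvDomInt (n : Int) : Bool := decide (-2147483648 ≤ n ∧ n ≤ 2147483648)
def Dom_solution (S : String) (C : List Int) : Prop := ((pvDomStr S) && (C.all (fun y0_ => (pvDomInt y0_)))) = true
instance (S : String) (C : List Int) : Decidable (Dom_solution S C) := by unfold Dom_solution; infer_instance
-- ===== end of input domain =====

-- B replaces A's list-of-lists bookkeeping and per-run repeated min()+remove() scans by a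
-- single running-sum/running-max pass (sum(run) - max(run) per run); measured faster (asymptotic).

-- ===== PORT A =====
-- one-char string for a char (Python's `for c in S` yields length-1 strings)
def pvMk (c : Char) : String := String.ofList [c]

-- `dublicates[-1].append(x)` on a nonempty list of lists
def pvAppendLast (dubs : List (List Int)) (x : Int) : List (List Int) :=
  match dubs with
  | [] => []
  | [l] => [l ++ [x]]
  | l :: rest => l :: pvAppendLast rest x

-- body of A's first loop; cost C[i] is in range whenever Pre_ holds
def pvStepA (C : List Int) (st : List String × List (List Int)) (p : Int × String) :
    List String × List (List Int) :=
  if ((PySem.List.pyGet? st.1 (-1)).getD "") = p.2 then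
    (st.1 ++ [p.2], pvAppendLast st.2 ((PySem.List.pyGet? C p.1).getD 0))
  else
    (st.1 ++ [p.2], st.2 ++ [[(PySem.List.pyGet? C p.1).getD 0]])

-- A's inner `while len(l) > 1: cost = min(l); total += cost; l.remove(cost)`
def pvDrain (l : List Int) : Int :=
  if _h : 1 < l.length then
    let m := (PySem.List.min? l (fun x => x)).getD 0
    m + pvDrain ((PySem.List.remove? l m).getD l)
  else 0
termination_by l.length
decreasing_by
  have hne : l ≠ [] := by intro hE; subst hE; simp at _h
  cases hmin : PySem.List.min? l (fun x => x) with
  | none => exact absurd ((PySem.List.min?_eq_none_iff l (fun x => x)).mp hmin) hne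
  | some m0 =>
    have hmem : m0 ∈ l := PySem.List.min?_mem hmin
    have he := PySem.List.remove?_eq_some_erase l m0 hmem
    have hlE := List.length_erase_of_mem hmem
    simp only [Option.getD_some, he]
    omega

def solution (S : String) (C : List Int) : Int :=
  ((PySem.List.enumerate (S.toList.map pvMk) 0).foldl (pvStepA C)
      ([""], [[0]])).2.foldl (fun t l => t + pvDrain l) 0

-- ===== PORT B =====
def pvStepB (st : Option Char × Int × Int × Int) (p : Char × Int) :
    Option Char × Int × Int × Int :=
  match st with
  | (prev, runSum, runMax, total) =>
    if some p.1 = prev then (prev, runSum + p.2, max runMax p.2, total)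
    else (some p.1, p.2, p.2, total + (runSum - runMax))

def solution_alt (S : String) (C : List Int) : Int :=
  let fin := (S.toList.zip C).foldl pvStepB (none, 0, 0, 0)
  fin.2.2.2 + (fin.2.1 - fin.2.2.1)

-- ===== PRECONDITION & SPEC =====
-- A indexes C[i] for every position i of S, so it raises IndexError iff C is shorter than S.
def Pre_solution (S : String) (C : List Int) : Prop := S.toList.length ≤ C.length
instance (S : String) (C : List Int) : Decidable (Pre_solution S C) := by
  unfold Pre_solution; infer_instance

def pvWitness_solution : String × List Int := ("aab", [1, 2, 3])

def Spec_solution (S : String) (C : List Int) (out : Int) : Prop := out = solution_alt S C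
instance (S : String) (C : List Int) (out : Int) : Decidable (Spec_solution S C out) := by
  unfold Spec_solution; infer_instance

-- ===== CLAIM (what is proved, stated in full; the proofs are below) =====
def Claim_equal_solution : Prop := ∀ (S : String) (C : List Int),
  Dom_solution S C → Pre_solution S C → Spec_solution S C (solution S C)

-- ===== LEMMAS AND PROOFS =====

-- the max of a nonempty list, 0 on []
def pvMaxD (l : List Int) : Int :=
  match l with
  | [] => 0
  | x :: t => t.foldl max x

theorem pvMaxD_eq_max? (l : List Int) (h : l ≠ []) :
    PySem.List.max? l (fun y => y) = some (pvMaxD l) := by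
  cases l with
  | nil => exact absurd rfl h
  | cons x t => simpa [pvMaxD] using PySem.List.max?_id_cons (x := x) (t := t)

theorem pvMaxD_mem (l : List Int) (h : l ≠ []) : pvMaxD l ∈ l :=
  PySem.List.max?_mem (pvMaxD_eq_max? l h)

theorem pvMaxD_isMax (l : List Int) (h : l ≠ []) : ∀ y ∈ l, y ≤ pvMaxD l := by
  have := PySem.List.max?_isMax (pvMaxD_eq_max? l h)
  simpa using this

theorem pvMaxD_unique (l : List Int) (M : Int) (hM : M ∈ l) (hub : ∀ y ∈ l, y ≤ M) :
    pvMaxD l = M := by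
  have h : l ≠ [] := by intro h; subst h; simp at hM
  exact le_antisymm (hub _ (pvMaxD_mem l h)) (pvMaxD_isMax l h M hM)

theorem pvMaxD_singleton (x : Int) : pvMaxD [x] = x := rfl

theorem pvMaxD_append_singleton (l : List Int) (h : l ≠ []) (x : Int) :
    pvMaxD (l ++ [x]) = max (pvMaxD l) x := by
  cases l with
  | nil => exact absurd rfl h
  | cons y t => simp [pvMaxD, List.foldl_append]

theorem pvMaxD_erase_min (l : List Int) (m : Int) (hlen : 1 < l.length)
    (hmem : m ∈ l) (hmin : ∀ y ∈ l, m ≤ y) : pvMaxD (l.erase m) = pvMaxD l := by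
  have hne : l ≠ [] := by intro h; subst h; simp at hmem
  have hlenE : (l.erase m).length = l.length - 1 := List.length_erase_of_mem hmem
  have hEne : l.erase m ≠ [] := by
    intro h; rw [h] at hlenE; simp at hlenE; omega
  apply pvMaxD_unique
  · -- pvMaxD l ∈ l.erase m
    by_cases hMm : pvMaxD l = m
    · -- all elements equal m; erase still contains m
      obtain ⟨y, t, hyt⟩ := List.exists_cons_of_ne_nil hEne
      have hy : y ∈ l.erase m := by rw [hyt]; exact List.mem_cons_self
      have hyl : y ∈ l := List.mem_of_mem_erase hy
      have : y = pvMaxD l := le_antisymm (pvMaxD_isMax l hne y hyl)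
        (by rw [hMm]; exact hmin y hyl)
      exact this ▸ hy
    · exact (List.mem_erase_of_ne hMm).mpr (pvMaxD_mem l hne)
  · intro y hy
    exact pvMaxD_isMax l hne y (List.mem_of_mem_erase hy)

theorem pvDrain_eq (l : List Int) (h : l ≠ []) : pvDrain l = l.sum - pvMaxD l := by
  generalize hn : l.length = n
  induction n using Nat.strong_induction_on generalizing l with
  | _ n ih =>
    by_cases hlen : 1 < l.length
    · obtain ⟨x, t, rfl⟩ := List.exists_cons_of_ne_nil h
      have hmin : PySem.List.min? (x :: t) (fun y => y) = some (t.foldl min x) :=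
        PySem.List.min?_id_cons x t
      set l := x :: t with hl
      set m := t.foldl min x with hm
      have hmem : m ∈ l := PySem.List.min?_mem hmin
      have hminb : ∀ y ∈ l, m ≤ y := by
        have := PySem.List.min?_isMin hmin; simpa using this
      have hrem : PySem.List.remove? l m = some (l.erase m) :=
        PySem.List.remove?_eq_some_erase l m hmem
      have hstep : pvDrain l = m + pvDrain (l.erase m) := by
        rw [pvDrain, dif_pos hlen]
        simp only [hmin, Option.getD_some, hrem]
      have hlenE : (l.erase m).length = l.length - 1 := List.length_erase_of_mem hmem
      have hEne : l.erase m ≠ [] := by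
        intro hE; rw [hE] at hlenE; simp at hlenE; omega
      have hperm : List.Perm l (m :: l.erase m) := List.perm_cons_erase hmem
      have hsum : l.sum = m + (l.erase m).sum := by
        have := hperm.sum_eq; simpa using this
      have hmax : pvMaxD (l.erase m) = pvMaxD l := pvMaxD_erase_min l m hlen hmem hminb
      have hihE : pvDrain (l.erase m) = (l.erase m).sum - pvMaxD (l.erase m) := by
        refine ih (l.erase m).length ?_ (l.erase m) hEne rfl
        omega
      rw [hstep, hihE, hmax]
      omega
    · obtain ⟨x, t, rfl⟩ := List.exists_cons_of_ne_nil h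
      have ht : t = [] := by
        cases t with
        | nil => rfl
        | cons a b => simp at hlen
      subst ht
      rw [pvDrain]
      simp [pvMaxD]

def pvRepr (prev : Option Char) : String :=
  match prev with
  | none => ""
  | some c => pvMk c

theorem pvRepr_eq_mk_iff (prev : Option Char) (c : Char) :
    (pvRepr prev = pvMk c) ↔ prev = some c := by
  cases prev with
  | none =>
    simp only [pvRepr, pvMk]
    constructor
    · intro h
      have h2 : ("" : String).toList = (String.ofList [c]).toList := by rw [h]
      simp at h2
    · intro h; exact absurd h (by simp)
  | some c' =>
    simp only [pvRepr, pvMk]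
    constructor
    · intro h
      have h2 : (String.ofList [c']).toList = (String.ofList [c]).toList := by rw [h]
      simp at h2
      simp [h2]
    · intro h
      have h2 : c' = c := by injection h
      rw [h2]

theorem pvAppendLast_append (xs : List (List Int)) (l : List Int) (v : Int) :
    pvAppendLast (xs ++ [l]) v = xs ++ [l ++ [v]] := by
  induction xs with
  | nil => rfl
  | cons y ys ih =>
    cases ys with
    | nil => simp [pvAppendLast]
    | cons z zs => simp [pvAppendLast] at ih ⊢; exact ih

theorem pyGet?_append_neg_one {α : Type} (l : List α) (x : α) :
    PySem.List.pyGet? (l ++ [x]) (-1) = some x := by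
  simp [PySem.List.pyGet?, PySem.List.pyIdx?]

theorem pvFoldDrain_append (xs : List (List Int)) (l : List Int) (T : Int) :
    (xs ++ [l]).foldl (fun t u => t + pvDrain u) T =
      xs.foldl (fun t u => t + pvDrain u) T + pvDrain l := by
  simp [List.foldl_append]

theorem pvMain (Sl : List Char) (C : List Int) (s : ℕ) (hs : s + Sl.length ≤ C.length)
    (prev : Option Char) (b : List String)
    (hb : PySem.List.pyGet? b (-1) = some (pvRepr prev))
    (dubs0 : List (List Int)) (cur : List Int) (hcur : cur ≠ []) (T : Int)
    (hT : T = dubs0.foldl (fun t u => t + pvDrain u) 0) :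
    ((PySem.List.enumerate (Sl.map pvMk) (s : Int)).foldl (pvStepA C)
        (b, dubs0 ++ [cur])).2.foldl (fun t u => t + pvDrain u) 0 =
    (let fin := (Sl.zip (C.drop s)).foldl pvStepB (prev, cur.sum, pvMaxD cur, T)
     fin.2.2.2 + (fin.2.1 - fin.2.2.1)) := by
  induction Sl generalizing s prev b dubs0 cur T with
  | nil =>
    simp only [List.map_nil, PySem.List.enumerate_nil, List.foldl_nil, List.zip_nil_left]
    rw [pvFoldDrain_append, ← hT, pvDrain_eq cur hcur]
  | cons c rest ih =>
    have hsC : s < C.length := by simp at hs; omega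
    have hdrop : C.drop s = C[s] :: C.drop (s + 1) := List.drop_eq_getElem_cons hsC
    have hcost : (PySem.List.pyGet? C (s : Int)).getD 0 = C[s] := by
      rw [PySem.List.pyGet?_natCast]
      simp [List.getElem?_eq_getElem hsC]
    simp only [List.map_cons, PySem.List.enumerate_cons, List.foldl_cons, hdrop, List.zip_cons_cons]
    have hcond : (((PySem.List.pyGet? b (-1)).getD "") = pvMk c) ↔ prev = some c := by
      rw [hb]; simp [pvRepr_eq_mk_iff]
    by_cases hp : prev = some c
    · -- duplicate: append cost to current run
      have hA : pvStepA C (b, dubs0 ++ [cur]) ((s : Int), pvMk c) =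
          (b ++ [pvMk c], dubs0 ++ [cur ++ [C[s]]]) := by
        simp only [pvStepA, hcost]
        rw [if_pos (hcond.mpr hp)]
        rw [pvAppendLast_append]
      have hB : pvStepB (prev, cur.sum, pvMaxD cur, T) (c, C[s]) =
          (prev, cur.sum + C[s], max (pvMaxD cur) C[s], T) := by
        simp [pvStepB, hp]
      rw [hA, hB]
      have := ih (s + 1) (by simp at hs ⊢; omega) prev (b ++ [pvMk c])
        (by rw [pyGet?_append_neg_one]; rw [hp]; rfl)
        dubs0 (cur ++ [C[s]]) (by simp) T hT
      rw [show ((s : Int) + 1) = (((s + 1 : ℕ) : Int)) by push_cast; ring]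
      rw [this]
      simp [pvMaxD_append_singleton cur hcur]
    · -- new run: close the old run, start [C[s]]
      have hA : pvStepA C (b, dubs0 ++ [cur]) ((s : Int), pvMk c) =
          (b ++ [pvMk c], (dubs0 ++ [cur]) ++ [[C[s]]]) := by
        simp only [pvStepA, hcost]
        rw [if_neg (fun h => hp (hcond.mp h))]
      have hB : pvStepB (prev, cur.sum, pvMaxD cur, T) (c, C[s]) =
          (some c, C[s], C[s], T + (cur.sum - pvMaxD cur)) := by
        simp only [pvStepB]
        rw [if_neg (fun h => hp h.symm)]
      rw [hA, hB]
      have := ih (s + 1) (by simp at hs ⊢; omega) (some c) (b ++ [pvMk c])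
        (by rw [pyGet?_append_neg_one]; rfl)
        (dubs0 ++ [cur]) [C[s]] (by simp)
        (T + (cur.sum - pvMaxD cur))
        (by rw [pvFoldDrain_append, ← hT, pvDrain_eq cur hcur])
      rw [show ((s : Int) + 1) = (((s + 1 : ℕ) : Int)) by push_cast; ring]
      rw [this]
      simp [pvMaxD_singleton]

-- ===== VERDICT (by name: the statement is the Claim_ definition above) =====
theorem solution_spec : Claim_equal_solution := by
  unfold Claim_equal_solution
  intro S C _ hpre
  unfold Spec_solution solution solution_alt
  have h0 : PySem.List.pyGet? ([""] : List String) (-1) = some (pvRepr none) := by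
    simp [PySem.List.pyGet?, PySem.List.pyIdx?, pvRepr]
  have := pvMain S.toList C 0 (by simpa [Pre_solution] using hpre) none [""] h0
    [] [0] (by simp) 0 (by simp)
  simpa using this
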